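-- pv_equiv track=rewrite | github.com/jithinvijayan007/erp1 | enquiry_mobile/views0_1.py | paginate_data
-- ===== SOURCE A (Python) =====
-- def paginate_data(dct_data,int_page_legth):
--     dct_paged = {}
--     int_count = 1
--     # sorted_dct_data = reversed(sorted(dct_data.items())
--     # dct_data = OrderedDict(sorted_dct_data)
--     for key in dct_data:
--         if int_count not in dct_paged:
--             dct_paged[int_count]=[]
--             dct_paged[int_count].append(key)
--         elif len(dct_paged[int_count]) < int_page_legth:
--             dct_paged[int_count].append(key)
--         else:
--             int_count += 1
--             dct_paged[int_count] =[]
--             dct_paged[int_count].append(key)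
--     return dct_paged
-- ===== SOURCE B (Python) =====
-- def paginate_data(dct_data, int_page_legth):
--     keys = list(dct_data)
--     size = max(int_page_legth, 1)
--     pages = {}
--     page = 1
--     while keys:
--         pages[page] = keys[:size]
--         keys = keys[size:]
--         page += 1
--     return pages
-- ===== Notes on version B (the rewrite author's own statement) =====
-- stated objective: simpler
-- what changed: B replaces A's per-key stateful loop (dict-membership check, length test, page counter mutation) by slicing the key list into whole pages of size max(int_page_legth, 1) at once, assigning each slice directly to its page number.
import Mathlib
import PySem

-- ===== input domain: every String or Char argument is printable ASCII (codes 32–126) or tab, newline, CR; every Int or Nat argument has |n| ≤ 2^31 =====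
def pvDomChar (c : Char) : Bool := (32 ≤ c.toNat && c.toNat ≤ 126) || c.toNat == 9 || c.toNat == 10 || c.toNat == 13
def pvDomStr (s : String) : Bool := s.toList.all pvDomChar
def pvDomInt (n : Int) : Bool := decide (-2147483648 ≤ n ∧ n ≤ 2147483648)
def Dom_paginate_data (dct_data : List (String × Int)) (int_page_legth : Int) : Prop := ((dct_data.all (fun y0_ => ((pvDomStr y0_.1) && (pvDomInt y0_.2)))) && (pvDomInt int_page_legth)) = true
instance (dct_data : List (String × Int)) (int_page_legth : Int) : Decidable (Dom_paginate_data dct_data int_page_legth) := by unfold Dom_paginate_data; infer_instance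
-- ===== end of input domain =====

-- B replaces A's per-key stateful loop by slicing the key list into whole pages of
-- size max(int_page_legth, 1); objective: simpler (same cost).

-- ===== PORT A =====
-- one iteration of A's `for key in dct_data` loop; state = (dct_paged, int_count)
def pagStep (int_page_legth : Int) (st : PySem.Dict Int (List String) × Int) (key : String) :
    PySem.Dict Int (List String) × Int :=
  let d := st.1
  let c := st.2
  if d.contains c = false then
    -- dct_paged[int_count] = []; dct_paged[int_count].append(key)
    ((d.insert c []).modify c [] (fun v => v ++ [key]), c)
  else if ((d.getD c []).length : Int) < int_page_legth then
    -- dct_paged[int_count].append(key)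
    (d.modify c [] (fun v => v ++ [key]), c)
  else
    -- int_count += 1; dct_paged[int_count] = []; dct_paged[int_count].append(key)
    (((d.insert (c + 1) []).modify (c + 1) [] (fun v => v ++ [key])), c + 1)

def paginate_data (dct_data : List (String × Int)) (int_page_legth : Int) : List (Int × List String) :=
  -- `for key in dct_data` iterates the dict's keys: distinct, first-occurrence order
  let keys := PySem.List.dedup (dct_data.map Prod.fst)
  (keys.foldl (pagStep int_page_legth) (PySem.Dict.empty, 1)).1.items

-- ===== PORT B =====
-- the `while keys:` loop of Source B; sz + 1 = size = max(int_page_legth, 1) ≥ 1, so the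
-- slices keys[:size] / keys[size:] are exactly k :: ks.take sz / ks.drop sz
def pvChunks (sz : Nat) (page : Int) : List String → List (Int × List String)
  | [] => []
  | k :: ks => (page, k :: ks.take sz) :: pvChunks sz (page + 1) (ks.drop sz)
termination_by ks => ks.length
decreasing_by simp

def paginate_data_alt (dct_data : List (String × Int)) (int_page_legth : Int) : List (Int × List String) :=
  let keys := PySem.List.dedup (dct_data.map Prod.fst)
  pvChunks ((max int_page_legth 1).toNat - 1) 1 keys

-- ===== PRECONDITION & SPEC =====
def Spec_paginate_data (dct_data : List (String × Int)) (int_page_legth : Int) (out : List (Int × List String)) : Prop := out = paginate_data_alt dct_data int_page_legth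
instance (dct_data : List (String × Int)) (int_page_legth : Int) (out : List (Int × List String)) : Decidable (Spec_paginate_data dct_data int_page_legth out) := by unfold Spec_paginate_data; infer_instance

-- ===== CLAIM (what is proved, stated in full; the proofs are below) =====
def Claim_equal_paginate_data : Prop := ∀ (dct_data : List (String × Int)) (int_page_legth : Int), Dom_paginate_data dct_data int_page_legth → Spec_paginate_data dct_data int_page_legth (paginate_data dct_data int_page_legth)

-- ===== LEMMAS AND PROOFS =====

theorem pvChunks_nil (sz : Nat) (p : Int) : pvChunks sz p [] = [] := by rw [pvChunks]

theorem pvChunks_cons (sz : Nat) (p : Int) (k : String) (ks : List String) :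
    pvChunks sz p (k :: ks) = (p, k :: ks.take sz) :: pvChunks sz (p + 1) (ks.drop sz) := by
  rw [pvChunks]

theorem pv_find_none (x : Int) (done : List (Int × List String))
    (h : ∀ p ∈ done, p.1 ≠ x) : done.find? (fun p => p.1 == x) = none := by
  apply List.find?_eq_none.mpr
  intro p hp
  simpa using h p hp

theorem pv_map_keep (x : Int) (v : List String) (done : List (Int × List String))
    (h : ∀ p ∈ done, p.1 ≠ x) :
    done.map (fun p => if p.1 == x then (x, v) else p) = done := by
  induction done with
  | nil => rfl
  | cons q qs ih =>
    have hq : q.1 ≠ x := h q (by simp)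
    simp only [List.map_cons]
    rw [if_neg (by simpa using hq), ih (fun p hp => h p (by simp [hp]))]

-- the dict after processing part of the keys is: the finished pages `done`,
-- then the current (nonempty, not over-full) page (c, cur)
theorem pv_loop_inv (L : Int) (ks : List String) :
    ∀ (done : List (Int × List String)) (c : Int) (cur : List String),
      cur ≠ [] → cur.length ≤ (max L 1).toNat → (∀ p ∈ done, p.1 < c) →
      (ks.foldl (pagStep L) (⟨done ++ [(c, cur)]⟩, c)).1.items
        = done ++ (c, cur ++ ks.take ((max L 1).toNat - cur.length))
            :: pvChunks ((max L 1).toNat - 1) (c + 1)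
                (ks.drop ((max L 1).toNat - cur.length)) := by
  induction ks with
  | nil => intro done c cur hne hle hlt; simp [pvChunks_nil]
  | cons k ks' ih =>
    intro done c cur hne hle hlt
    have hL : L ≤ max L 1 := le_max_left L 1
    have h1 : (1 : Int) ≤ max L 1 := le_max_right L 1
    have hM := max_choice L 1
    have hcast : ((max L 1).toNat : Int) = max L 1 := by omega
    have hcur1 : 1 ≤ cur.length := by
      cases cur with
      | nil => exact absurd rfl hne
      | cons a as => simp
    have hfdone : done.find? (fun p => p.1 == c) = none :=
      pv_find_none c done (fun p hp => ne_of_lt (hlt p hp))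
    have hcontc : (⟨done ++ [(c, cur)]⟩ : PySem.Dict Int (List String)).contains c = true := by
      simp [PySem.Dict.contains]
    have hget : (⟨done ++ [(c, cur)]⟩ : PySem.Dict Int (List String)).getD c [] = cur := by
      simp [PySem.Dict.getD, PySem.Dict.get?, List.find?_append, hfdone]
    simp only [List.foldl_cons]
    by_cases hfull : cur.length < (max L 1).toNat
    · -- room on the current page: append
      have hlc : (cur.length : Int) < L := by rcases hM with h | h <;> omega
      have hstep : pagStep L (⟨done ++ [(c, cur)]⟩, c) k = (⟨done ++ [(c, cur ++ [k])]⟩, c) := by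
        simp only [pagStep]
        rw [hcontc, if_neg (show ¬(true = false) by simp), hget, if_pos hlc]
        simp only [PySem.Dict.modify]
        rw [hget]
        simp only [PySem.Dict.insert]
        rw [hcontc, if_pos rfl]
        refine congrArg (fun l => ((⟨l⟩ : PySem.Dict Int (List String)), c)) ?_
        rw [List.map_append, pv_map_keep c (cur ++ [k]) done (fun p hp => ne_of_lt (hlt p hp))]
        simp
      rw [hstep, ih done c (cur ++ [k]) (by simp) (by simp only [List.length_append, List.length_cons, List.length_nil]; omega) hlt]
      obtain ⟨r', hr⟩ : ∃ r', (max L 1).toNat - cur.length = r' + 1 :=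
        ⟨(max L 1).toNat - cur.length - 1, by omega⟩
      have hr' : (max L 1).toNat - (cur ++ [k]).length = r' := by simp; omega
      rw [hr, hr']
      simp [List.take_succ_cons, List.drop_succ_cons]
    · -- page is full: start page c+1 with [k]
      have hlen : cur.length = (max L 1).toNat := by omega
      have hnlc : ¬ ((cur.length : Int) < L) := by rcases hM with h | h <;> omega
      have hfresh : ∀ p ∈ done ++ [(c, cur)], p.1 ≠ c + 1 := by
        intro p hp
        rcases List.mem_append.mp hp with h | h
        · have := hlt p h; omega
        · have hp' : p = (c, cur) := by simpa using h
          rw [hp']; omega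
      have hcont1 : (⟨done ++ [(c, cur)]⟩ : PySem.Dict Int (List String)).contains (c + 1) = false := by
        simp only [PySem.Dict.contains, List.any_eq_false]
        intro p hp; simpa using hfresh p hp
      have hstep : pagStep L (⟨done ++ [(c, cur)]⟩, c) k
          = (⟨(done ++ [(c, cur)]) ++ [(c + 1, [k])]⟩, c + 1) := by
        simp only [pagStep]
        rw [hcontc, if_neg (show ¬(true = false) by simp), hget, if_neg hnlc]
        simp only [PySem.Dict.insert]
        rw [hcont1, if_neg (show ¬(false = true) by simp)]
        simp only [PySem.Dict.modify, PySem.Dict.getD, PySem.Dict.get?, PySem.Dict.items]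
        rw [List.find?_append, pv_find_none (c + 1) (done ++ [(c, cur)]) hfresh]
        simp only [Option.none_or, List.find?_cons, beq_self_eq_true, if_pos rfl]
        simp only [PySem.Dict.insert, PySem.Dict.contains, List.any_append, List.any_cons,
          beq_self_eq_true, Bool.true_or, Bool.or_true, if_pos rfl]
        refine congrArg (fun l => ((⟨l⟩ : PySem.Dict Int (List String)), c + 1)) ?_
        rw [List.map_append, pv_map_keep (c + 1) _ (done ++ [(c, cur)]) hfresh]
        simp
      have hlt' : ∀ p ∈ done ++ [(c, cur)], p.1 < c + 1 := by
        intro p hp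
        rcases List.mem_append.mp hp with h | h
        · have := hlt p h; omega
        · have hp' : p = (c, cur) := by simpa using h
          rw [hp']; simp
      rw [hstep, ih (done ++ [(c, cur)]) (c + 1) [k] (by simp) (by simp only [List.length_append, List.length_cons, List.length_nil]; omega) hlt']
      rw [hlen]
      simp [Nat.sub_self, pvChunks_cons, List.append_assoc]

-- ===== VERDICT (by name: the statement is the Claim_ definition above) =====
theorem paginate_data_spec : Claim_equal_paginate_data := by
  intro dct_data L _
  unfold Spec_paginate_data paginate_data paginate_data_alt
  cases hk : PySem.List.dedup (dct_data.map Prod.fst) with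
  | nil => simp [pvChunks_nil, PySem.Dict.empty]
  | cons k rest =>
    have h1 : (1 : Int) ≤ max L 1 := le_max_right L 1
    have hcast : ((max L 1).toNat : Int) = max L 1 := by omega
    simp only [List.foldl_cons]
    have hstep : pagStep L (PySem.Dict.empty, 1) k = (⟨[] ++ [((1 : Int), [k])]⟩, 1) := by
      simp [pagStep, PySem.Dict.empty, PySem.Dict.contains, PySem.Dict.insert,
        PySem.Dict.modify, PySem.Dict.getD, PySem.Dict.get?]
    rw [hstep, pv_loop_inv L rest [] 1 [k] (by simp) (by simp only [List.length_append, List.length_cons, List.length_nil]; omega) (by simp)]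
    rw [pvChunks_cons]
    simp
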